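-- pv_equiv track=rewrite | github.com/kamrul-pu/problem-solving | leetcode/binary_search/10_min_days_to_make_m_bouquets.py | __f
-- ===== SOURCE A (Python) =====
-- from typing import List
--
-- def __f(bloomDay: List[int], m: int, k: int, day: int) -> bool:
--     """
--     Helper function to check if it's possible to make at least `m` bouquets
--     with `k` adjacent flowers each, using flowers that have bloomed by `day`.
--
--     Args:
--     - bloomDay: List of integers representing the days when flowers bloom.
--     - m: Integer, the number of bouquets to make.
--     - k: Integer, the number of adjacent flowers required for each bouquet.
--     - day: Integer, the current day being tested.
--
--     Returns:
--     - bool: True if it's possible to make at least `m` bouquets, False otherwise.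
--     """
--     cnt: int = 0  # Counter for adjacent flowers that have bloomed by `day`
--     total: int = 0  # Counter for total number of bouquets that can be made
--     for i in range(len(bloomDay)):
--         if bloomDay[i] <= day:
--             cnt += 1  # Increment count if flower at index `i` can be used
--         else:
--             total += (
--                 cnt // k
--             )  # Calculate number of bouquets that can be made so far
--             cnt = (
--                 0  # Reset count since consecutive flowers are required for bouquets
--             )
--     total += cnt // k  # Final calculation for remaining flowers
--     return total >= m  # Return True if enough bouquets can be made
-- ===== SOURCE B (Python) =====
-- from typing import List
--
-- def __f(bloomDay: List[int], m: int, k: int, day: int) -> bool: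
--     # Boundary-index method: collect the indices of unbloomed flowers, with
--     # sentinels -1 and len(bloomDay); each maximal bloomed run lies strictly
--     # between two consecutive boundaries and yields (b - a - 1) // k bouquets.
--     bad = [-1] + [i for i, d in enumerate(bloomDay) if d > day] + [len(bloomDay)]
--     total = 0
--     for a, b in zip(bad, bad[1:]):
--         total += (b - a - 1) // k
--     return total >= m
-- ===== Notes on version B (the rewrite author's own statement) =====
-- stated objective: alternative
-- what changed: B works on positions, not a running counter: it first builds the list of boundary indices (unbloomed flowers, with sentinels -1 and n) and then sums (b-a-1)//k over consecutive boundary pairs, whereas A walks the elements maintaining a run counter reset at each unbloomed flower plus a post-loop fix-up.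
import Mathlib
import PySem

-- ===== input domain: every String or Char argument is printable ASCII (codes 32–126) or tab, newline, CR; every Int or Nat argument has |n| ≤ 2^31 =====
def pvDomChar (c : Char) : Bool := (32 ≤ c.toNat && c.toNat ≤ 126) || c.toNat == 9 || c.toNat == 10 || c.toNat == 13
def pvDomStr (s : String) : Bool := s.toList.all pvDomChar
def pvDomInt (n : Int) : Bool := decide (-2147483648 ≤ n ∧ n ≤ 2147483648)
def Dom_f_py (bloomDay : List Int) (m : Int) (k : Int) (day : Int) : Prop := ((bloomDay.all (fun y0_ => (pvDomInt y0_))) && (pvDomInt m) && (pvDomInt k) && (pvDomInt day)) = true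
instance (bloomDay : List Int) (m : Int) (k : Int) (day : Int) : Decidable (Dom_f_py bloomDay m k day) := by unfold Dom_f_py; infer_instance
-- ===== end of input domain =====

-- B replaces A's element walk with a running counter (reset at each unbloomed
-- flower, plus a post-loop fix-up) by a boundary-index method: it first builds
-- the list of indices of unbloomed flowers with sentinels -1 and n, then sums
-- (b-a-1)//k over consecutive boundary pairs; same O(n) cost (objective: alternative).

-- ===== PORT A =====
-- the for-loop over range(len(bloomDay)) with state (cnt, total)
def f_py (bloomDay : List Int) (m : Int) (k : Int) (day : Int) : Bool :=
  let st := bloomDay.foldl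
    (fun (p : Int × Int) b =>
      if b ≤ day then (p.1 + 1, p.2)
      else (0, p.2 + PySem.Int.floordiv p.1 k))
    (0, 0)
  decide (st.2 + PySem.Int.floordiv st.1 k ≥ m)

-- ===== PORT B =====
def f_py_alt (bloomDay : List Int) (m : Int) (k : Int) (day : Int) : Bool :=
  -- bad = [-1] + [i for i, d in enumerate(bloomDay) if d > day] + [len(bloomDay)]
  let bad : List Int :=
    [-1] ++ ((PySem.List.enumerate bloomDay).filterMap
                (fun p => if p.2 > day then some p.1 else none))
         ++ [(bloomDay.length : Int)]
  -- for a, b in zip(bad, bad[1:]): total += (b - a - 1) // k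
  let total := (bad.zip (PySem.List.slice bad (some 1) none)).foldl
    (fun t p => t + PySem.Int.floordiv (p.2 - p.1 - 1) k) 0
  decide (total ≥ m)

-- ===== PRECONDITION & SPEC =====
-- Pre_ excludes exactly k = 0, on which A raises ZeroDivisionError
def Pre_f_py (bloomDay : List Int) (m : Int) (k : Int) (day : Int) : Prop := k ≠ 0
instance (bloomDay : List Int) (m : Int) (k : Int) (day : Int) : Decidable (Pre_f_py bloomDay m k day) := by unfold Pre_f_py; infer_instance
def pvWitness_f_py : List Int × Int × Int × Int := ([1, 10, 3, 10, 2], 3, 1, 3)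

def Spec_f_py (bloomDay : List Int) (m : Int) (k : Int) (day : Int) (out : Bool) : Prop := out = f_py_alt bloomDay m k day
instance (bloomDay : List Int) (m : Int) (k : Int) (day : Int) (out : Bool) : Decidable (Spec_f_py bloomDay m k day out) := by unfold Spec_f_py; infer_instance

-- ===== CLAIM (what is proved, stated in full; the proofs are below) =====
def Claim_equal_f_py : Prop := ∀ (bloomDay : List Int) (m : Int) (k : Int) (day : Int), Dom_f_py bloomDay m k day → Pre_f_py bloomDay m k day → Spec_f_py bloomDay m k day (f_py bloomDay m k day)

-- ===== LEMMAS AND PROOFS =====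

-- the common reference recursion: remaining list, current run length
def pvG (k day : Int) : List Int → Int → Int
  | [], cnt => PySem.Int.floordiv cnt k
  | x :: xs, cnt =>
    if x ≤ day then pvG k day xs (cnt + 1)
    else PySem.Int.floordiv cnt k + pvG k day xs 0

theorem pvA_eq_g (k day : Int) (xs : List Int) (cnt tot : Int) :
    (xs.foldl (fun (p : Int × Int) b =>
        if b ≤ day then (p.1 + 1, p.2)
        else (0, p.2 + PySem.Int.floordiv p.1 k)) (cnt, tot)).2
      + PySem.Int.floordiv (xs.foldl (fun (p : Int × Int) b =>
        if b ≤ day then (p.1 + 1, p.2)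
        else (0, p.2 + PySem.Int.floordiv p.1 k)) (cnt, tot)).1 k
    = tot + pvG k day xs cnt := by
  induction xs generalizing cnt tot with
  | nil => simp [pvG]
  | cons x xs ih =>
    by_cases h : x ≤ day <;> simp [pvG, h, List.foldl, ih] <;> ring

-- B's sum over consecutive pairs of the boundary list, recursively
def pvSumAdj (k a : Int) : List Int → Int
  | [] => 0
  | b :: rest => PySem.Int.floordiv (b - a - 1) k + pvSumAdj k b rest

-- the boundary indices of xs starting at position i
def pvBads (day i : Int) : List Int → List Int
  | [] => []
  | x :: xs => if x > day then i :: pvBads day (i + 1) xs else pvBads day (i + 1) xs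

theorem pvBads_eq_filterMap (day i : Int) (xs : List Int) :
    (PySem.List.enumerate xs i).filterMap
      (fun p => if p.2 > day then some p.1 else none) = pvBads day i xs := by
  induction xs generalizing i with
  | nil => simp [PySem.List.enumerate_nil, pvBads]
  | cons x xs ih =>
    by_cases h : x > day <;>
      simp [PySem.List.enumerate_cons, List.filterMap, h, pvBads, ih]

theorem pvFoldlAdj_shift (k : Int) (l : List (Int × Int)) (t : Int) :
    l.foldl (fun t p => t + PySem.Int.floordiv (p.2 - p.1 - 1) k) t
    = t + l.foldl (fun t p => t + PySem.Int.floordiv (p.2 - p.1 - 1) k) 0 := by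
  induction l generalizing t with
  | nil => simp
  | cons p l ih =>
    simp only [List.foldl]
    rw [ih, ih (0 + _)]; ring

theorem pvZip_eq_sumAdj (k a : Int) (rest : List Int) :
    ((a :: rest).zip rest).foldl
      (fun t p => t + PySem.Int.floordiv (p.2 - p.1 - 1) k) 0
    = pvSumAdj k a rest := by
  induction rest generalizing a with
  | nil => simp [pvSumAdj]
  | cons b rest ih =>
    simp only [List.zip_cons_cons, List.foldl, pvSumAdj]
    rw [pvFoldlAdj_shift, ih b]; ring

-- key lemma: sum over boundaries = run-counter recursion
theorem pvSum_eq_g (k day : Int) (xs : List Int) (i cnt : Int) :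
    pvSumAdj k (i - cnt - 1) (pvBads day i xs ++ [i + xs.length]) = pvG k day xs cnt := by
  induction xs generalizing i cnt with
  | nil =>
    simp only [pvBads, List.nil_append, pvSumAdj, pvG, List.length_nil]
    have : i + (0 : Int) - (i - cnt - 1) - 1 = cnt := by ring
    rw [Int.natCast_zero, this]; ring
  | cons x xs ih =>
    by_cases h : x ≤ day
    · have hx : ¬ x > day := by omega
      simp only [pvBads, if_neg hx, pvG, if_pos h, List.length_cons]
      have h1 : i - cnt - 1 = (i + 1) - (cnt + 1) - 1 := by ring
      have h2 : i + ((xs.length : Nat) + 1 : Nat) = (i + 1) + (xs.length : Int) := by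
        push_cast; ring
      rw [h1, h2, ih]
    · have hx : x > day := by omega
      simp only [pvBads, if_pos hx, pvG, if_neg h, List.cons_append, pvSumAdj,
        List.length_cons]
      have h1 : i - (i - cnt - 1) - 1 = cnt := by ring
      have h2 : i + ((xs.length : Nat) + 1 : Nat) = (i + 1) + (xs.length : Int) := by
        push_cast; ring
      have h4 := ih (i + 1) 0
      rw [show (i : Int) + 1 - 0 - 1 = i by ring] at h4
      rw [h1, h2, h4]

-- ===== VERDICT (by name: the statement is the Claim_ definition above) =====
theorem f_py_spec : Claim_equal_f_py := by
  intro bloomDay m k day _ _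
  unfold Spec_f_py
  simp only [f_py, f_py_alt]
  rw [pvA_eq_g, PySem.List.slice_from_one, pvBads_eq_filterMap]
  have hb : ([-1] ++ pvBads day 0 bloomDay ++ [(bloomDay.length : Int)])
      = (-1) :: (pvBads day 0 bloomDay ++ [(bloomDay.length : Int)]) := by simp
  rw [hb, List.tail_cons, pvZip_eq_sumAdj]
  have : (-1 : Int) = 0 - 0 - 1 := by ring
  rw [this]
  have h0 : (bloomDay.length : Int) = 0 + (bloomDay.length : Int) := by ring
  rw [h0, pvSum_eq_g]
  simp
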